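-- pv_equiv track=rewrite | github.com/aminchedo/Aihoghoghi | archive/testing/smart_government_scraper_builtin.py | is_blocked_content
-- ===== SOURCE A (Python) =====
-- def is_blocked_content(content: str) -> bool:
--     """Check if content indicates blocking/protection"""
--     blocking_indicators = [
--         'transferring to the website',
--         'cloudflare',
--         'arvancloud',
--         'access denied',
--         'forbidden',
--         'rate limited',
--         'just a moment',
--         'please wait',
--         'checking your browser'
--     ]
--
--     content_lower = content.lower()
--     return any(indicator in content_lower for indicator in blocking_indicators)
-- ===== SOURCE B (Python) =====
-- import re
--
-- _BLOCKING_RE = re.compile('|'.join(re.escape(p) for p in (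
--     'transferring to the website',
--     'cloudflare',
--     'arvancloud',
--     'access denied',
--     'forbidden',
--     'rate limited',
--     'just a moment',
--     'please wait',
--     'checking your browser',
-- )))
--
-- def is_blocked_content(content: str) -> bool:
--     """Check if content indicates blocking/protection"""
--     return _BLOCKING_RE.search(content.lower()) is not None
-- ===== Notes on version B (the rewrite author's own statement) =====
-- stated objective: idiomatic
-- what changed: Nine independent substring-membership scans are replaced by one precompiled regex alternation searched in a single pass over the lowercased content.
import Mathlib
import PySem

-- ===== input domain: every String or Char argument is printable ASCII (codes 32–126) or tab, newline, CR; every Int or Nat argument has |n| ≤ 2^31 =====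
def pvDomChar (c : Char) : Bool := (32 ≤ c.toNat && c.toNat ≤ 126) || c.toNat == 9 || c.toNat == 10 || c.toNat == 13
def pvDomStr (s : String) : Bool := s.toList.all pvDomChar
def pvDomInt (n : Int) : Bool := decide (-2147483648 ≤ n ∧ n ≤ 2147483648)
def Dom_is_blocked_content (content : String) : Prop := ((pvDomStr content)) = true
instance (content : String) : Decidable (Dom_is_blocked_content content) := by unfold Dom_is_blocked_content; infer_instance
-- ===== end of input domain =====

-- B replaces nine independent substring scans by one precompiled regex-alternation search (a single pass); same result.

-- the nine indicator phrases, shared verbatim by both programs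
def pvIndicators : List String :=
  ["transferring to the website", "cloudflare", "arvancloud", "access denied",
   "forbidden", "rate limited", "just a moment", "please wait", "checking your browser"]

-- ===== PORT A =====
-- any(indicator in content_lower for indicator in blocking_indicators)
def is_blocked_content (content : String) : Bool :=
  let contentLower := PySem.Str.lower content
  pvIndicators.any (fun indicator => PySem.Str.isIn indicator contentLower)

-- ===== PORT B =====
-- _BLOCKING_RE.search(content.lower()) is not None: the regex engine tries each
-- position of the lowered string in turn and, at each, every alternative; the
-- alternatives are literal phrases, so 'a match starts at i' = 'some phrase is a
-- prefix of s.drop i'. Exact for literal alternations.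
def is_blocked_content_alt (content : String) : Bool :=
  let s := PySem.Str.lower content
  (List.range (s.toList.length + 1)).any
    (fun i => pvIndicators.any (fun p => PySem.Chars.startswith (s.toList.drop i) p.toList))

-- ===== PRECONDITION & SPEC =====
def Spec_is_blocked_content (content : String) (out : Bool) : Prop := out = is_blocked_content_alt content
instance (content : String) (out : Bool) : Decidable (Spec_is_blocked_content content out) := by unfold Spec_is_blocked_content; infer_instance

-- ===== CLAIM (what is proved, stated in full; the proofs are below) =====
def Claim_equal_is_blocked_content : Prop := ∀ (content : String), Dom_is_blocked_content content → Spec_is_blocked_content content (is_blocked_content content)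

-- ===== LEMMAS AND PROOFS =====

-- 'sub in s' equals 'some position i ≤ len s has sub as a prefix of s.drop i'
theorem pv_isIn_eq_scan (sub s : List Char) :
    PySem.Chars.isIn sub s =
      (List.range (s.length + 1)).any (fun i => PySem.Chars.startswith (s.drop i) sub) := by
  rcases h : (List.range (s.length + 1)).any (fun i => PySem.Chars.startswith (s.drop i) sub) with _ | _
  · simp only [List.any_eq_false, List.mem_range] at h
    rw [PySem.Chars.isIn_eq_false_iff]
    intro hinf
    have hex : ∃ j, sub <+: s.drop j := by
      obtain ⟨t, u, hu⟩ := hinf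
      exact ⟨t.length, by simp [← hu, List.drop_left', List.prefix_append]⟩
    obtain ⟨j, hj⟩ := hex
    by_cases hle : j ≤ s.length
    · exact absurd ((PySem.Chars.startswith_iff _ _).mpr hj)
        (by simpa using h j (by omega))
    · have : s.drop j = [] := List.drop_eq_nil_of_le (by omega)
      rw [this] at hj
      have hnil : sub = [] := List.prefix_nil.mp hj
      have hpre : sub <+: s.drop s.length := by simp [hnil]
      exact absurd ((PySem.Chars.startswith_iff _ _).mpr hpre)
        (by simpa using h s.length (by omega))
  · simp only [List.any_eq_true, List.mem_range] at h
    obtain ⟨i, _, hi⟩ := h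
    have hj := (PySem.Chars.startswith_iff _ _).mp hi
    exact (PySem.Chars.exists_prefix_drop_iff_isIn sub s).mp ⟨i, hj⟩

theorem pv_any_swap {α β : Type} (l1 : List α) (l2 : List β) (f : α → β → Bool) :
    l1.any (fun a => l2.any (fun b => f a b)) = l2.any (fun b => l1.any (fun a => f a b)) := by
  rw [Bool.eq_iff_iff]
  simp only [List.any_eq_true]
  tauto

-- ===== VERDICT (by name: the statement is the Claim_ definition above) =====
theorem is_blocked_content_spec : Claim_equal_is_blocked_content := by
  intro content _
  unfold Spec_is_blocked_content is_blocked_content is_blocked_content_alt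
  simp only [PySem.Str.isIn, pv_isIn_eq_scan]
  exact pv_any_swap _ _ _
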